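-- pv_equiv track=rewrite | github.com/T-Python-OCT9/LAB_DICTIONARIES | lab_dictionaries.py | ZeroToRight
-- ===== SOURCE A (Python) =====
-- def ZeroToRight(numbers_receives: list) -> list:
--     new_list = []
--     for n in numbers_receives:
--         if n == 0:
--             new_list.append(n)
--         else:
--             new_list.insert(0, n)
--     return new_list
-- ===== SOURCE B (Python) =====
-- def ZeroToRight(numbers_receives: list) -> list:
--     non_zeros = [n for n in numbers_receives if n != 0]
--     non_zeros.reverse()
--     return non_zeros + [0] * (len(numbers_receives) - len(non_zeros))
-- ===== Notes on version B (the rewrite author's own statement) =====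
-- stated objective: faster
-- what changed: Replaces the per-element insert(0, n) loop (each insert shifts the whole list) by one filter pass producing the non-zeros, a reverse, and appending the right number of zeros.
import Mathlib
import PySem

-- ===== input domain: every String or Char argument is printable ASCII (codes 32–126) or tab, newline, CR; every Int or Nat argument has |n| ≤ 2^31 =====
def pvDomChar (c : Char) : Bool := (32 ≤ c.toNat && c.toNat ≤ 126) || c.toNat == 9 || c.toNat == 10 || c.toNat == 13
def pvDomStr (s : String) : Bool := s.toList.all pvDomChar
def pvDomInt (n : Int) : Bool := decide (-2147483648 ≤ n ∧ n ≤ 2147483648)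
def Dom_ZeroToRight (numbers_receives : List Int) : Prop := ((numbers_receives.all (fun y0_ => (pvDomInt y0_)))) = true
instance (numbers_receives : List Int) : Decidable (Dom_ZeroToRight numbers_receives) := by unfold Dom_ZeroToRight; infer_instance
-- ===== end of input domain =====

-- B: one filter pass (reversed non-zeros) plus appended zeros instead of A's quadratic insert(0,_) loop; faster (asymptotic).
-- ===== PORT A =====
def ZeroToRight (numbers_receives : List Int) : List Int :=
  numbers_receives.foldl
    (fun new_list n => if n == 0 then new_list ++ [n] else n :: new_list) []

-- ===== PORT B =====
def ZeroToRight_alt (numbers_receives : List Int) : List Int :=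
  let non_zeros := (numbers_receives.filter (fun n => n != 0)).reverse
  non_zeros ++ List.replicate (numbers_receives.length - non_zeros.length) 0

-- ===== PRECONDITION & SPEC =====
def Spec_ZeroToRight (numbers_receives : List Int) (out : List Int) : Prop := out = ZeroToRight_alt numbers_receives
instance (numbers_receives : List Int) (out : List Int) : Decidable (Spec_ZeroToRight numbers_receives out) := by unfold Spec_ZeroToRight; infer_instance

-- ===== CLAIM (what is proved, stated in full; the proofs are below) =====
def Claim_equal_ZeroToRight : Prop := ∀ (numbers_receives : List Int), Dom_ZeroToRight numbers_receives → Spec_ZeroToRight numbers_receives (ZeroToRight numbers_receives)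

-- ===== LEMMAS AND PROOFS =====

theorem ztr_loop (l : List Int) (acc : List Int) :
    l.foldl (fun new_list n => if n == 0 then new_list ++ [n] else n :: new_list) acc
      = (l.filter (fun n => n != 0)).reverse ++ acc ++ (l.filter (fun n => n == 0)) := by
  induction l generalizing acc with
  | nil => simp
  | cons h t ih =>
    by_cases hz : h = 0
    · subst hz
      rw [List.foldl_cons, if_pos (by decide), ih]; simp
    · rw [List.foldl_cons, if_neg (by simpa using hz), ih]; simp [hz]

theorem ztr_zeros (l : List Int) :
    l.filter (fun n => n == 0)
      = List.replicate (l.length - ((l.filter (fun n => n != 0)).reverse).length) 0 := by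
  induction l with
  | nil => simp
  | cons h t ih =>
    by_cases hz : h = 0
    · subst hz
      have hle : (t.filter (fun n => n != 0)).length ≤ t.length := List.length_filter_le _ _
      simp only [List.filter_cons, List.length_reverse] at *
      simp [ih, Nat.succ_sub hle, List.replicate_succ]
    · simp only [List.filter_cons, List.length_reverse] at *
      simp [hz, ih]

-- ===== VERDICT (by name: the statement is the Claim_ definition above) =====
theorem ZeroToRight_spec : Claim_equal_ZeroToRight := by
  intro l _
  show ZeroToRight l = ZeroToRight_alt l
  unfold ZeroToRight ZeroToRight_alt
  rw [ztr_loop]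
  simp [ztr_zeros l]
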